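-- pv_equiv track=rewrite | github.com/VanNostrandLab/eclip | source/fastd.py | barcoding
-- ===== SOURCE A (Python) =====
-- barcodes_dict = {'A01': 'AAGCAAT',
--                  'A03': 'ATGACCNNNNT',
--                  'A04': 'CAGCTTNNNNT',
--                  'B06': 'GGCTTGT',
--                  'C01': 'ACAAGTT',
--                  'D8f': 'TGGTCCT',
--                  'F05': 'GGATACNNNNT',
--                  'G07': 'TCCTGTNNNNT',
--                  'X1A': 'NNNNNCCTATAT',
--                  'X1B': 'NNNNNTGCTATT',
--                  'X2A': 'NNNNNTATACTT',
--                  'X2B': 'NNNNNATCTTCT'}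
--
-- def hamming(key, barcode, seq, allow_mismatch=0):
--     mismatch = len(barcode) - sum(x == y or x == 'N' or y == 'N' for x, y in zip(barcode, seq))
--     return (key, len(barcode), mismatch) if mismatch <= allow_mismatch else None
--
-- def barcoding(read, max_barcode_length=0, randomer_length=0, allow_mismatch=0):
--     (name1, seq1, quality1), (name2, seq2, quality2) = read
--     n1, n2 = name1.split()[0], name2.split()[0]
--     assert n1 == n2, ValueError(f'Paired-End reads have mismatch names: {n1} != {n2}')
--
--     matches = (hamming(key, barcode, seq1[:max_barcode_length], allow_mismatch=allow_mismatch)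
--                for key, barcode in barcodes_dict.items())
--     matches = [match for match in matches if match]
--     if matches:
--         barcode, barcode_length, _ = sorted(matches, key=lambda x: x[2])[0]
--     else:
--         barcode, barcode_length = 'NIL', randomer_length
--     r1 = f'@{seq2[:randomer_length]}:{name1}\n{seq1[barcode_length:]}\n+\n{quality1[barcode_length:]}\n'
--     r2 = f'@{seq2[:randomer_length]}:{name2}\n{seq2[randomer_length:]}\n+\n{quality2[randomer_length:]}\n'
--     return barcode, r1, r2
-- ===== SOURCE B (Python) =====
-- barcodes_dict = {'A01': 'AAGCAAT',
--                  'A03': 'ATGACCNNNNT',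
--                  'A04': 'CAGCTTNNNNT',
--                  'B06': 'GGCTTGT',
--                  'C01': 'ACAAGTT',
--                  'D8f': 'TGGTCCT',
--                  'F05': 'GGATACNNNNT',
--                  'G07': 'TCCTGTNNNNT',
--                  'X1A': 'NNNNNCCTATAT',
--                  'X1B': 'NNNNNTGCTATT',
--                  'X2A': 'NNNNNTATACTT',
--                  'X2B': 'NNNNNATCTTCT'}
--
--
-- def _mismatch(bs, ps):
--     # count positions that disagree (no 'N' on either side); unpaired tail of bs all counts
--     if not bs or not ps:
--         return len(bs)
--     bad = bs[0] != ps[0] and bs[0] != 'N' and ps[0] != 'N'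
--     return (1 if bad else 0) + _mismatch(bs[1:], ps[1:])
--
--
-- def _best(items, prefix, allow):
--     # first barcode with minimal mismatch <= allow, by recursion on the tail:
--     # the current (earlier) item beats an equally good later one via '<='
--     if not items:
--         return None
--     key, bc = items[0]
--     rest = _best(items[1:], prefix, allow)
--     m = _mismatch(bc, prefix)
--     if m > allow:
--         return rest
--     if rest is None or m <= rest[2]:
--         return (key, len(bc), m)
--     return rest
--
--
-- def _fastq(umi, name, seq, qual, cut):
--     return '@{}:{}\n{}\n+\n{}\n'.format(umi, name, seq[cut:], qual[cut:])
--
--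
-- def barcoding(read, max_barcode_length=0, randomer_length=0, allow_mismatch=0):
--     (name1, seq1, quality1), (name2, seq2, quality2) = read
--     n1, n2 = name1.split()[0], name2.split()[0]
--     assert n1 == n2, ValueError(f'Paired-End reads have mismatch names: {n1} != {n2}')
--     hit = _best(list(barcodes_dict.items()), seq1[:max_barcode_length], allow_mismatch)
--     if hit is None:
--         barcode, cut = 'NIL', randomer_length
--     else:
--         barcode, cut = hit[0], hit[1]
--     umi = seq2[:randomer_length]
--     return (barcode,
--             _fastq(umi, name1, seq1, quality1, cut),
--             _fastq(umi, name2, seq2, quality2, randomer_length))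
-- ===== Notes on version B (the rewrite author's own statement) =====
-- stated objective: alternative
-- what changed: Replaces the generator->filter-list->sorted()[0] pipeline with back-to-front recursion over the barcode list that keeps the earliest minimal match via '<=', computes mismatch by direct recursive counting of disagreeing positions (instead of len minus a matched-position sum over zip), and factors the duplicated read formatting into one _fastq helper.
import Mathlib
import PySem

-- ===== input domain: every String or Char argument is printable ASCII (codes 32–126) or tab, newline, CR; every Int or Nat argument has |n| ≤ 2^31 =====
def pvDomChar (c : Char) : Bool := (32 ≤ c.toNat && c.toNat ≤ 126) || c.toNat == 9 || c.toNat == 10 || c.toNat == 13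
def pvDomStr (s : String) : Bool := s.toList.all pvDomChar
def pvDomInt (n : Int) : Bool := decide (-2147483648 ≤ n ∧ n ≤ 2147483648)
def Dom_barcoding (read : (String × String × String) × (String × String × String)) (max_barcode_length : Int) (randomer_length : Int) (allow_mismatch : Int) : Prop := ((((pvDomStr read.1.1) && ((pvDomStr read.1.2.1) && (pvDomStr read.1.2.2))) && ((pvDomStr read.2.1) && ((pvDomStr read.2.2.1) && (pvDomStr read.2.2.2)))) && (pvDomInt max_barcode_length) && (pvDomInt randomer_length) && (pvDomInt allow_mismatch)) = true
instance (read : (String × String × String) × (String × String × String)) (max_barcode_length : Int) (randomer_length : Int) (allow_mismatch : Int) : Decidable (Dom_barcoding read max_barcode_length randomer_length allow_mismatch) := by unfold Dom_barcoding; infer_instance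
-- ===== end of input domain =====

-- B replaces A's generator → filter-list → sorted()[0] pipeline with back-to-front recursion over
-- the barcode list (earliest minimal match kept via '≤'), a recursive mismatch counter, and one
-- shared read-formatting helper; objective: alternative. Equivalence is about the return value;
-- neither version mutates its arguments.

-- ===== PORT A =====
-- barcodes_dict.items() of the module-level literal dict (insertion order)
def pvBarcodes : List (String × String) :=
  [("A01", "AAGCAAT"), ("A03", "ATGACCNNNNT"), ("A04", "CAGCTTNNNNT"),
   ("B06", "GGCTTGT"), ("C01", "ACAAGTT"), ("D8f", "TGGTCCT"),
   ("F05", "GGATACNNNNT"), ("G07", "TCCTGTNNNNT"), ("X1A", "NNNNNCCTATAT"),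
   ("X1B", "NNNNNTGCTATT"), ("X2A", "NNNNNTATACTT"), ("X2B", "NNNNNATCTTCT")]

-- A's helper: mismatch = len(barcode) - sum(x == y or x == 'N' or y == 'N' for x, y in zip(...))
def hammingA (key : String) (barcode : String) (seq : String) (allow_mismatch : Int) :
    Option (String × Int × Int) :=
  let mismatch : Int := PySem.Str.len barcode -
    ((barcode.toList.zip seq.toList).countP
      (fun p => p.1 == p.2 || p.1 == 'N' || p.2 == 'N') : Nat)
  if mismatch ≤ allow_mismatch then some (key, PySem.Str.len barcode, mismatch) else none

-- A's selection: sorted(matches, key=x[2])[0] if matches else ('NIL', randomer_length)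
def pickA (mlist : List (String × Int × Int)) (randomer_length : Int) : String × Int :=
  if mlist ≠ [] then
    match PySem.List.sorted mlist (fun x => x.2.2) false with
    | m :: _ => (m.1, m.2.1)
    | [] => ("NIL", randomer_length)   -- unreachable: sorted of a nonempty list is nonempty
  else ("NIL", randomer_length)

-- the assert on name1.split()[0] == name2.split()[0] only raises in Python; the raising inputs
-- (empty split or unequal first tokens) are excluded by Pre_barcoding below.
def barcoding (read : (String × String × String) × (String × String × String)) (max_barcode_length : Int) (randomer_length : Int) (allow_mismatch : Int) : String × String × String :=
  let name1 := read.1.1; let seq1 := read.1.2.1; let quality1 := read.1.2.2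
  let name2 := read.2.1; let seq2 := read.2.2.1; let quality2 := read.2.2.2
  let mlist := pvBarcodes.filterMap
    (fun kv => hammingA kv.1 kv.2 (PySem.Str.slice seq1 none (some max_barcode_length)) allow_mismatch)
  let bb := pickA mlist randomer_length
  let barcode := bb.1; let barcode_length := bb.2
  let r1 := "@" ++ PySem.Str.slice seq2 none (some randomer_length) ++ ":" ++ name1 ++ "\n" ++
    PySem.Str.slice seq1 (some barcode_length) none ++ "\n+\n" ++
    PySem.Str.slice quality1 (some barcode_length) none ++ "\n"
  let r2 := "@" ++ PySem.Str.slice seq2 none (some randomer_length) ++ ":" ++ name2 ++ "\n" ++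
    PySem.Str.slice seq2 (some randomer_length) none ++ "\n+\n" ++
    PySem.Str.slice quality2 (some randomer_length) none ++ "\n"
  (barcode, r1, r2)

-- ===== PORT B =====
-- B's _mismatch: recursive count of disagreeing paired positions plus the unpaired tail of bs
def mmB : List Char → List Char → Int
  | bs, [] => (bs.length : Int)
  | [], _ :: _ => 0
  | b :: bs, p :: ps => (if b ≠ p ∧ b ≠ 'N' ∧ p ≠ 'N' then 1 else 0) + mmB bs ps

-- B's _best: recursion on the tail; the earlier item beats an equally good later one via '≤'
def bestB : List (String × String) → List Char → Int → Option (String × Int × Int)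
  | [], _, _ => none
  | (key, bc) :: items, pfx, allow =>
    let rest := bestB items pfx allow
    let m := mmB bc.toList pfx
    if m > allow then rest
    else match rest with
      | none => some (key, PySem.Str.len bc, m)
      | some r => if m ≤ r.2.2 then some (key, PySem.Str.len bc, m) else rest

-- B's _fastq helper
def fastqB (umi name seq qual : String) (cut : Int) : String :=
  "@" ++ umi ++ ":" ++ name ++ "\n" ++ PySem.Str.slice seq (some cut) none ++ "\n+\n" ++
    PySem.Str.slice qual (some cut) none ++ "\n"

def barcoding_alt (read : (String × String × String) × (String × String × String)) (max_barcode_length : Int) (randomer_length : Int) (allow_mismatch : Int) : String × String × String :=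
  let hit := bestB pvBarcodes (PySem.Str.slice read.1.2.1 none (some max_barcode_length)).toList allow_mismatch
  let bc := match hit with
    | none => (("NIL" : String), randomer_length)
    | some h => (h.1, h.2.1)
  let umi := PySem.Str.slice read.2.2.1 none (some randomer_length)
  (bc.1,
   fastqB umi read.1.1 read.1.2.1 read.1.2.2 bc.2,
   fastqB umi read.2.1 read.2.2.1 read.2.2.2 randomer_length)

-- ===== PRECONDITION & SPEC =====
-- Pre_ excludes exactly the inputs on which Python A raises: a name that is all whitespace
-- (split()[0] is an IndexError) or paired names whose first tokens differ (the assert fires).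
def Pre_barcoding (read : (String × String × String) × (String × String × String)) (max_barcode_length : Int) (randomer_length : Int) (allow_mismatch : Int) : Prop :=
  PySem.Str.split₀ read.1.1 ≠ [] ∧ PySem.Str.split₀ read.2.1 ≠ [] ∧
  (PySem.Str.split₀ read.1.1).head? = (PySem.Str.split₀ read.2.1).head?
instance (read : (String × String × String) × (String × String × String)) (max_barcode_length : Int) (randomer_length : Int) (allow_mismatch : Int) : Decidable (Pre_barcoding read max_barcode_length randomer_length allow_mismatch) := by unfold Pre_barcoding; infer_instance

def pvWitness_barcoding : ((String × String × String) × (String × String × String)) × Int × Int × Int :=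
  ((("r1 x", "AAGCAATGGG", "IIIIIIIIII"), ("r1 y", "ACGTACGT", "IIIIIIII")), 7, 3, 1)

def Spec_barcoding (read : (String × String × String) × (String × String × String)) (max_barcode_length : Int) (randomer_length : Int) (allow_mismatch : Int) (out : String × String × String) : Prop := out = barcoding_alt read max_barcode_length randomer_length allow_mismatch
instance (read : (String × String × String) × (String × String × String)) (max_barcode_length : Int) (randomer_length : Int) (allow_mismatch : Int) (out : String × String × String) : Decidable (Spec_barcoding read max_barcode_length randomer_length allow_mismatch out) := by unfold Spec_barcoding; infer_instance

-- ===== CLAIM (what is proved, stated in full; the proofs are below) =====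
def Claim_equal_barcoding : Prop := ∀ (read : (String × String × String) × (String × String × String)) (max_barcode_length : Int) (randomer_length : Int) (allow_mismatch : Int), Dom_barcoding read max_barcode_length randomer_length allow_mismatch → Pre_barcoding read max_barcode_length randomer_length allow_mismatch → Spec_barcoding read max_barcode_length randomer_length allow_mismatch (barcoding read max_barcode_length randomer_length allow_mismatch)

-- ===== LEMMAS AND PROOFS =====

-- keep-first strict minimum, folded left (head of A's stable sort steps this way)
def pvUpd {α : Type} (key : α → Int) (b : Option α) (x : α) : Option α :=
  match b with
  | none => some x
  | some c => if key x < key c then some x else some c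

-- keep-left weak minimum, folded right (B's recursion steps this way)
def pvUpdLe {α : Type} (key : α → Int) (x : α) (b : Option α) : Option α :=
  match b with
  | none => some x
  | some c => if key x ≤ key c then some x else some c

theorem pvUpd_head_insertBy {α : Type} (key : α → Int) (x : α) (ys : List α) :
    (PySem.List.insertBy (fun a b => decide (key a < key b)) x ys).head? = pvUpd key ys.head? x := by
  cases ys with
  | nil => simp [PySem.List.insertBy, pvUpd]
  | cons y t =>
    simp only [PySem.List.insertBy, pvUpd, List.head?]
    split_ifs with h h' <;> simp_all

theorem head_foldl_insertBy {α : Type} (key : α → Int) (l : List α) (acc : List α) :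
    (l.foldl (fun acc x => PySem.List.insertBy (fun a b => decide (key a < key b)) x acc) acc).head?
      = l.foldl (pvUpd key) acc.head? := by
  induction l generalizing acc with
  | nil => rfl
  | cons x t ih => simp [List.foldl, ih, pvUpd_head_insertBy]

-- head of Python's stable sort = running first-minimum fold
theorem head_sorted_eq_foldl {α : Type} (key : α → Int) (l : List α) :
    (PySem.List.sorted l key false).head? = l.foldl (pvUpd key) none := by
  rw [PySem.List.sorted_eq_foldl_insertBy]
  simpa using head_foldl_insertBy key l []

-- left fold with keep-first '<' started at some x = pvUpdLe x of the fold started empty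
-- one step: preferring the earlier of x,y (ties to the later-comparing x via '<') commutes with pvUpdLe
theorem updLe_step {α : Type} (key : α → Int) (x y : α) (r : Option α) :
    pvUpdLe key (if key y < key x then y else x) r = pvUpdLe key x (pvUpdLe key y r) := by
  cases r with
  | none =>
    simp only [pvUpdLe]
    split_ifs <;> first | rfl | omega
  | some c =>
    by_cases h1 : key y ≤ key c
    · rw [show pvUpdLe key y (some c) = some y from by simp [pvUpdLe, h1]]
      simp only [pvUpdLe]
      split_ifs <;> first | rfl | omega
    · rw [show pvUpdLe key y (some c) = some c from by simp [pvUpdLe, h1]]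
      simp only [pvUpdLe]
      split_ifs <;> first | rfl | omega

theorem foldl_some_eq_updLe {α : Type} (key : α → Int) (t : List α) (x : α) :
    t.foldl (pvUpd key) (some x) = pvUpdLe key x (t.foldl (pvUpd key) none) := by
  induction t generalizing x with
  | nil => rfl
  | cons y t ih =>
    have hupd : pvUpd key (some x) y = some (if key y < key x then y else x) := by
      by_cases h : key y < key x <;> simp [pvUpd, h]
    simp only [List.foldl]
    rw [show pvUpd key none y = some y from rfl, hupd, ih, ih]
    exact updLe_step key x y _

-- left first-minimum fold = right keep-left-weak-minimum fold
theorem foldl_upd_eq_foldr_updLe {α : Type} (key : α → Int) (l : List α) :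
    l.foldl (pvUpd key) none = l.foldr (pvUpdLe key) none := by
  induction l with
  | nil => rfl
  | cons x t ih =>
    simp only [List.foldl, List.foldr, pvUpd, ← ih]
    exact foldl_some_eq_updLe key t x

-- B's recursive counter computes A's len - matched-count
theorem mmB_eq (bs ps : List Char) :
    mmB bs ps = (bs.length : Int) -
      ((bs.zip ps).countP (fun p => p.1 == p.2 || p.1 == 'N' || p.2 == 'N') : Nat) := by
  induction bs generalizing ps with
  | nil => cases ps <;> simp [mmB]
  | cons b bs ih =>
    cases ps with
    | nil => simp [mmB]
    | cons p ps =>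
      simp only [mmB, List.zip_cons_cons, List.countP_cons, ih]
      have hle : (bs.zip ps).countP (fun p => p.1 == p.2 || p.1 == 'N' || p.2 == 'N') ≤ bs.length :=
        le_trans List.countP_le_length (by rw [List.length_zip]; omega)
      by_cases hcond : b ≠ p ∧ b ≠ 'N' ∧ p ≠ 'N'
      · have hb : (b == p || b == 'N' || p == 'N') = false := by
          simp [hcond.1, hcond.2.1, hcond.2.2]
        rw [if_pos hcond]
        simp only [hb, Bool.false_eq_true, if_false, List.length_cons]
        push_cast; omega
      · have h' : b = p ∨ b = 'N' ∨ p = 'N' := by tauto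
        have hb : (b == p || b == 'N' || p == 'N') = true := by
          rcases h' with h | h | h <;> simp [h]
        rw [if_neg hcond]
        simp only [hb, if_true, List.length_cons]
        push_cast; omega

-- B's recursion = right keep-left fold over A's filtered match list
theorem bestB_eq (l : List (String × String)) (pfx : String) (allow : Int) :
    bestB l pfx.toList allow
      = (l.filterMap (fun kv => hammingA kv.1 kv.2 pfx allow)).foldr
          (pvUpdLe (fun x : String × Int × Int => x.2.2)) none := by
  induction l with
  | nil => rfl
  | cons kv t ih =>
    obtain ⟨key, bc⟩ := kv
    simp only [List.filterMap_cons]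
    have hm : mmB bc.toList pfx.toList
        = PySem.Str.len bc -
          ((bc.toList.zip pfx.toList).countP (fun p => p.1 == p.2 || p.1 == 'N' || p.2 == 'N') : Nat) := by
      rw [mmB_eq]; simp [PySem.Str.len]
    by_cases h : PySem.Str.len bc -
        ((bc.toList.zip pfx.toList).countP (fun p => p.1 == p.2 || p.1 == 'N' || p.2 == 'N') : Nat)
        ≤ allow
    · rw [show hammingA key bc pfx allow = some (key, PySem.Str.len bc,
          PySem.Str.len bc -
            ((bc.toList.zip pfx.toList).countP (fun p => p.1 == p.2 || p.1 == 'N' || p.2 == 'N') : Nat))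
          from by simp only [hammingA]; rw [if_pos h]]
      simp only [bestB, List.foldr, ← ih, hm]
      rw [if_neg (not_lt.mpr h)]
      cases bestB t pfx.toList allow with
      | none => rfl
      | some r => simp [pvUpdLe]
    · rw [show hammingA key bc pfx allow = none from by simp only [hammingA]; rw [if_neg h]]
      simp only [bestB, ← ih, hm]
      rw [if_pos (not_le.mp h)]

-- A's selection from the sorted match list = unpacking of the right fold
theorem pick_eq (L : List (String × Int × Int)) (rl : Int) :
    pickA L rl = (match L.foldr (pvUpdLe (fun x : String × Int × Int => x.2.2)) none with
                  | none => (("NIL" : String), rl)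
                  | some h => (h.1, h.2.1)) := by
  rw [← foldl_upd_eq_foldr_updLe]
  cases L with
  | nil => simp [pickA]
  | cons x t =>
    have hhead := head_sorted_eq_foldl (fun x : String × Int × Int => x.2.2) (x :: t)
    unfold pickA
    rw [if_pos (by simp)]
    rcases hs : PySem.List.sorted (x :: t) (fun x => x.2.2) false with _ | ⟨m, s⟩
    · exact absurd ((PySem.List.sorted_eq_nil_iff (x :: t) (fun x => x.2.2) false).mp hs)
        (by simp)
    · rw [hs] at hhead
      simp only [List.head?] at hhead
      rw [← hhead]

-- ===== VERDICT (by name: the statement is the Claim_ definition above) =====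
theorem barcoding_spec : Claim_equal_barcoding := by
  intro read mbl rl am _ _
  unfold Spec_barcoding barcoding barcoding_alt fastqB
  dsimp only
  rw [bestB_eq, pick_eq]
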